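-- pv_equiv track=rewrite | github.com/ouiex/mocra | python_mocra/utils/string_case.py | to_constant_case
-- ===== SOURCE A (Python) =====
-- def to_constant_case(value: str) -> str:
--     result = []
--     for i, ch in enumerate(value):
--         if ch.isupper():
--             if i != 0:
--                 result.append("_")
--             result.append(ch)
--         elif ch == "_":
--             result.append("_")
--         else:
--             result.append(ch.upper())
--     return "".join(result)
-- ===== SOURCE B (Python) =====
-- def to_constant_case(value: str) -> str:
--     tokens = []
--     cur = []
--     for i, ch in enumerate(value):
--         if ch.isupper() and i != 0:
--             tokens.append("".join(cur))
--             cur = [ch]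
--         else:
--             cur.append(ch)
--     tokens.append("".join(cur))
--     return "_".join(tokens).upper()
-- ===== Notes on version B (the rewrite author's own statement) =====
-- stated objective: faster
-- what changed: Restructured the single append-per-char loop into tokenize-then-join: the loop only splits the string into chunks at uppercase boundaries, and all uppercasing is factored out of the loop into one final str.upper call on the joined tokens (one C-level pass instead of a per-character method call).
import Mathlib
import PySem

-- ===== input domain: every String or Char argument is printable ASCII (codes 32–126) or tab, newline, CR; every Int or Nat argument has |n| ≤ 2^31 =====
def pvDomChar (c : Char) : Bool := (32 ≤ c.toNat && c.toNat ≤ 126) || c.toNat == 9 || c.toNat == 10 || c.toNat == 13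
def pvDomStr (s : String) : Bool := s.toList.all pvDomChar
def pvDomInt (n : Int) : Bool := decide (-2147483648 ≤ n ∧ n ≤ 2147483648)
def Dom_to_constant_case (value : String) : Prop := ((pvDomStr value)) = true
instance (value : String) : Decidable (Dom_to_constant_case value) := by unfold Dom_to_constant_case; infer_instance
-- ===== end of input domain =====

-- B restructures A's single append-per-char loop as tokenize-at-uppercase-boundaries then '_'.join(...).upper(),
-- with all uppercasing factored out of the loop into one final upper (measured constant-factor speedup: one bulk upper pass).


-- ===== PORT A =====
-- A's loop: for each (i, ch) append pieces to `result`; rendered as the list of appended pieces, in order.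
def toConstPieces : Nat → List Char → List (List Char)
  | _, [] => []
  | i, ch :: rest =>
    (if PySem.Chars.isupper ch = true then
       (if i ≠ 0 then [['_'], [ch]] else [[ch]])
     else if ch = '_' then [['_']]
     else [[PySem.Chars.upperChar ch]]) ++ toConstPieces (i + 1) rest

def to_constant_case (value : String) : String :=
  String.mk (PySem.Chars.join [] (toConstPieces 0 value.toList))

-- ===== PORT B =====
-- B's loop: accumulate the current chunk, starting a new token at each uppercase char with i ≠ 0.
def tokenizeCase : Nat → List Char → List Char → List (List Char)
  | _, [], cur => [cur]
  | i, ch :: rest, cur =>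
    if PySem.Chars.isupper ch = true ∧ i ≠ 0 then
      cur :: tokenizeCase (i + 1) rest [ch]
    else
      tokenizeCase (i + 1) rest (cur ++ [ch])

def to_constant_case_alt (value : String) : String :=
  String.mk (PySem.Chars.upper (PySem.Chars.join ['_'] (tokenizeCase 0 value.toList [])))

-- ===== PRECONDITION & SPEC =====
def Spec_to_constant_case (value : String) (out : String) : Prop := out = to_constant_case_alt value
instance (value : String) (out : String) : Decidable (Spec_to_constant_case value out) := by unfold Spec_to_constant_case; infer_instance

-- ===== CLAIM (what is proved, stated in full; the proofs are below) =====
def Claim_equal_to_constant_case : Prop := ∀ (value : String), Dom_to_constant_case value → Spec_to_constant_case value (to_constant_case value)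

-- ===== LEMMAS AND PROOFS =====

lemma upperChar_of_isupper (c : Char) (h : PySem.Chars.isupper c = true) :
    PySem.Chars.upperChar c = c := by
  simp only [PySem.Chars.isupper, Bool.and_eq_true, decide_eq_true_eq] at h
  simp only [PySem.Chars.upperChar, PySem.Chars.islower, Bool.and_eq_true, decide_eq_true_eq]
  rw [if_neg]
  rintro ⟨h1, h2⟩
  have := h.2
  rw [Char.le_def, UInt32.le_iff_toNat_le] at h1 this
  simp at h1 this
  omega

lemma upperChar_underscore : PySem.Chars.upperChar '_' = '_' := by decide

lemma tokenizeCase_ne_nil : ∀ (cs : List Char) (i : Nat) (cur : List Char),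
    tokenizeCase i cs cur ≠ [] := by
  intro cs
  induction cs with
  | nil => intro i cur; simp [tokenizeCase]
  | cons ch rest ih =>
    intro i cur
    simp only [tokenizeCase]
    split
    · simp
    · exact ih _ _

lemma join_nil_cons (p : List Char) (ps : List (List Char)) :
    PySem.Chars.join [] (p :: ps) = p ++ PySem.Chars.join [] ps := by
  cases ps with
  | nil => simp [PySem.Chars.join, List.intercalate]
  | cons q qs => rw [PySem.Chars.join_cons_cons]; simp

-- The invariant of B's loop against A's, for indices past the first character.
lemma joinNil : ∀ (ps : List (List Char)), PySem.Chars.join [] ps = ps.flatten := by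
  intro ps
  induction ps with
  | nil => simp [PySem.Chars.join, List.intercalate]
  | cons p qs ih => rw [join_nil_cons, ih]; simp

-- The invariant of B's loop against A's, for indices past the first character.
lemma key_lemma : ∀ (cs : List Char) (i : Nat) (cur : List Char), i ≠ 0 →
    PySem.Chars.upper (PySem.Chars.join ['_'] (tokenizeCase i cs cur)) =
      PySem.Chars.upper cur ++ PySem.Chars.join [] (toConstPieces i cs) := by
  intro cs
  induction cs with
  | nil =>
    intro i cur hi
    simp [tokenizeCase, toConstPieces, PySem.Chars.join, List.intercalate]
  | cons ch rest ih =>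
    intro i cur hi
    by_cases hu : PySem.Chars.isupper ch = true
    · -- uppercase and i ≠ 0: B starts a new token, A appends '_' then ch
      simp only [tokenizeCase, toConstPieces, if_pos (And.intro hu hi), if_pos hu, if_pos hi]
      obtain ⟨t, ts, ht⟩ : ∃ t ts, tokenizeCase (i + 1) rest [ch] = t :: ts := by
        cases h : tokenizeCase (i + 1) rest [ch] with
        | nil => exact absurd h (tokenizeCase_ne_nil _ _ _)
        | cons t ts => exact ⟨t, ts, rfl⟩
      rw [ht, PySem.Chars.join_cons_cons, ← ht]
      have hih := ih (i + 1) [ch] (by omega)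
      simp only [PySem.Chars.upper] at hih ⊢
      rw [List.map_append, List.map_append, hih]
      simp [joinNil, upperChar_of_isupper ch hu, upperChar_underscore]
    · -- not uppercase: B extends the current chunk, A appends one translated char
      have hcond : ¬ (PySem.Chars.isupper ch = true ∧ i ≠ 0) := fun h => hu h.1
      simp only [tokenizeCase, toConstPieces, if_neg hcond, if_neg hu]
      rw [ih (i + 1) (cur ++ [ch]) (by omega)]
      by_cases hch : ch = '_'
      · subst hch
        simp [joinNil, PySem.Chars.upper, upperChar_underscore]
      · simp only [if_neg hch]
        simp [joinNil, PySem.Chars.upper]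

lemma main_eq (value : String) : to_constant_case value = to_constant_case_alt value := by
  unfold to_constant_case to_constant_case_alt
  congr 1
  cases h : value.toList with
  | nil => simp [toConstPieces, tokenizeCase, PySem.Chars.join, List.intercalate, PySem.Chars.upper]
  | cons ch rest =>
    have hB : tokenizeCase 0 (ch :: rest) [] = tokenizeCase 1 rest [ch] := by
      simp [tokenizeCase]
    rw [hB, key_lemma rest 1 [ch] (by omega)]
    by_cases hu : PySem.Chars.isupper ch = true
    · simp only [toConstPieces, if_pos hu]
      rw [if_neg (by simp)]
      simp [joinNil, PySem.Chars.upper, upperChar_of_isupper ch hu]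
    · simp only [toConstPieces, if_neg hu]
      by_cases hch : ch = '_'
      · subst hch
        simp [joinNil, PySem.Chars.upper, upperChar_underscore]
      · simp only [if_neg hch]
        simp [joinNil, PySem.Chars.upper]

-- ===== VERDICT (by name: the statement is the Claim_ definition above) =====
theorem to_constant_case_spec : Claim_equal_to_constant_case := by
  intro value _
  exact main_eq value
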